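/-
  THE SPLIT OF SEGMENT .1 OF `decode_residue` (0x10ec00–0x10ee34, C 2132–2152; claim `Seg1` of Vorbis/Spec/DecodeResidue.lean) IN FOUR
  UNITS AT THREE EXISTING LABELS.

      cut      label                          what the instruction is                         assertion
      0x10ec95 `L.decode_residue.ret1`        `movsxd rax, ebx` (after the check of            At1b
                                              `f->residue_config`: the prologue is over)
      0x10ed48 `L.decode_residue.ret8`        `mov eax, ebx` (after the check of               At1c
                                              `r->part_size`, before the `div`)
      0x10edca `L.decode_residue.cut1`        `mov rdi, rax` (after `setup_temp_malloc`)       At1d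

      Seg1a    unit `decode_residue.1a`, 0x10ec00–0x10ec90 (26 instructions, one check call): the function's entry → `At1b`.
               The PROTECTED PROLOGUE: six pushes, `sub rsp, 0xc8`, the spills, the frame header, the three shadow stores.
      Seg1b    unit `decode_residue.1b`, 0x10ec95–0x10ed43 + 0x10ee02–0x10ee0c (41 instructions, seven check calls): `At1b` → `At1c`.
               The residue lookup (`r`, `rtype`, the class book, `classwords`), `actual_size`, `limit_r_begin`, `n_read`.
               THE WALKER FORKS at `je 10ee02` (0x10ed09) and at both `cmova` (0x10ed24, 0x10ed38): 8 paths, 2 of them impossible by R4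
               (`begin ≤ end`); `At1c` states the three results with `min`, so the 6 paths MERGE at 0x10ed48.
      Seg1c    unit `decode_residue.1c`, 0x10ed48–0x10edc5 (+ the dead `alloca` arm 0x10ee11–0x10ee34; 34 instructions, three check
               calls, `setup_temp_malloc`): `At1c` → `At1d`. `div` (`part_read`), `temp_alloc_point`, `f->channels`, the test of
               `alloc_buffer` (never NULL: AR5 + AR1), the request `(part_read + 1)·C·8 = g.sz` (T3: it fits), the allocation.
      Seg1d    unit `decode_residue.1d`, 0x10edca–0x10ee00 (11 instructions, `make_block_array`): `At1d` → `At3` (with `i = 0`).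
      Seg1.of_parts    `Seg1a → Seg1b → Seg1c → Seg1d → Seg1` (PROVED here: `ReachVia.trans`).

  WHY THESE CUTS. 0x10ec95: before it the shadow is written (the prologue's three stores), after it never again in this segment:
  the state at 0x10ec95 is a base state (`At1b.shadow` is the `ShadowInv` of ITS memory; `v_untouched` works from there).
  0x10ed48: the merge point of the six paths, before the expensive part. 0x10edca: after the allocator the arena ghost, the live list
  and the shadow layer have changed (`g.A'`, `g.others'`); the state is a base state again.

  CONVENTIONS as in DecodeResidue.lean: RA = `g.RA` = the entry stack pointer; `[rbp − X]` is `g.e.reg .rsp − (8 + X)`.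
-/
import Vorbis.Spec.DecodeResidue
import Vorbis.Spec.DecodeResidueCarry
namespace Vorbis.Spec
open X86 X86.User Asan

namespace DecodeResidue

/-! ### The assertion after the prologue -/

/-- **The assertion at 0x10ec95** (`L.decode_residue.ret1`: `movsxd rax, ebx`, after the check of `f->residue_config`; exit of .1a,
entry of .1b). The frame is set up: `rbp`, the steady `rsp`, the six saved registers, the spills of the five arguments that are
spilled, the frame header and `base >> 3`. Everything written so far lies in `[RA − 256, RA)` (the frame and the return address of
the one check call) or in the 12 shadow bytes of the protected frame. The shadow layer has the own frame as the innermost protected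
frame (`ShadowInv.prologue_ra`); the live NON-stack objects are still the entry's (`g.others`: no allocation yet).

Live registers at 0x10ec95 (read before written by 0x10ec95–0x10ed43): `rbx` (`rn`), `r15` (`f`), `rbp`, `rsp`. -/
structure At1b (u₀ : State) (g : G) (v : State) : Prop where
  /-- at `ret1` -/
  rip : v.rip = L.decode_residue.ret1
  /-- the steady stack pointer `rbp − 0xf0`: six pushes and `sub rsp, 0xc8` (`48 + 200 = 248`) -/
  rsp : v.reg .rsp = g.e.reg .rsp - 248
  /-- `rbp = RA − 8` (0x10ec01) -/
  rbp : v.reg .rbp = g.e.reg .rsp - 8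
  /-- `r15 = f` (0x10ec14) -/
  r15 : v.reg .r15 = g.e.reg .rdi
  /-- `ebx = rn`, zero-extended (0x10ec31 `mov ebx, r8d`): the number is `g.rn` (`toNat_ofBV32`, `toNat_part32`); spelled as the
  walker leaves it, so that `movsxd rax, ebx` of .1b rewrites -/
  rbx : v.reg .rbx = Word.ofBV (Word.part .w32 (g.e.reg .r8))
  /-- the image's text is unchanged -/
  code : CodeOK u₀ v.mem
  /-- DF = 0, the SSE exceptions masked -/
  inv : abiInv v
  /-- saved rbp, `[rbp]` -/
  s_rbp : UInt64.ofNat (v.mem.readLE (g.e.reg .rsp - 8) 8) = g.e.reg .rbp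
  /-- saved r15, `[rbp−8]` -/
  s_r15 : UInt64.ofNat (v.mem.readLE (g.e.reg .rsp - 16) 8) = g.e.reg .r15
  /-- saved r14, `[rbp−0x10]` -/
  s_r14 : UInt64.ofNat (v.mem.readLE (g.e.reg .rsp - 24) 8) = g.e.reg .r14
  /-- saved r13, `[rbp−0x18]` -/
  s_r13 : UInt64.ofNat (v.mem.readLE (g.e.reg .rsp - 32) 8) = g.e.reg .r13
  /-- saved r12, `[rbp−0x20]` -/
  s_r12 : UInt64.ofNat (v.mem.readLE (g.e.reg .rsp - 40) 8) = g.e.reg .r12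
  /-- saved rbx, `[rbp−0x28]` -/
  s_rbx : UInt64.ofNat (v.mem.readLE (g.e.reg .rsp - 48) 8) = g.e.reg .rbx
  /-- `[rbp−0xb0] = f` (0x10ec17) -/
  fr_f : UInt64.ofNat (v.mem.readLE (g.e.reg .rsp - 184) 8) = g.e.reg .rdi
  /-- `[rbp−0xd0] = residue_buffers` (0x10ec1e) -/
  fr_rb : UInt64.ofNat (v.mem.readLE (g.e.reg .rsp - 216) 8) = g.e.reg .rsi
  /-- `[rbp−0x94] = ch` (4 bytes; 0x10ec25) -/
  fr_ch : v.mem.readLE (g.e.reg .rsp - 156) 4 = g.ch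
  /-- `[rbp−0xc8] = n` (4 bytes; 0x10ec2b) -/
  sl_n : v.mem.readLE (g.e.reg .rsp - 208) 4 = g.n
  /-- `[rbp−0xa0] = do_not_decode` (0x10ec34) -/
  sl_dnd : UInt64.ofNat (v.mem.readLE (g.e.reg .rsp - 168) 8) = g.e.reg .r9
  /-- `[rbp−0xe8] = (rbp − 0x90) >> 3`: the granule index of the protected frame's base (0x10ec64) -/
  fr_si : v.mem.readLE (g.e.reg .rsp - 240) 8 = (g.RA - 152) / 8
  /-- written so far: the own frame with the return address of the check call, and the 12 shadow bytes of the protected frame -/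
  same : Mem.SameExcept [⟨g.RA - 256, g.RA⟩, shadowSpan (g.RA - 152) (g.RA - 56)] g.e.mem v.mem
  /-- the shadow layer: the own frame is the innermost protected frame, the stack is clean below the steady stack pointer; the
  live non-stack objects are the ENTRY's -/
  shadow : ShadowInv g.others g.frames' (g.RA - 248) v.mem

/-! ### The assertion at the merge point before the `div` -/

/-- **The assertion at 0x10ed48** (`L.decode_residue.ret8`: `mov eax, ebx`, after the check of `r->part_size`; exit of .1b, entry of
.1c). The frame of `At1b` with two more spills (`rtype`, `classwords`); `r14 = r`; `ebx = n_read`.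

HOW EACH PATH ESTABLISHES `rbx` (A = `Res.actualDec g.rtype g.n`, b = `r->begin`, e = `r->end`, all below 2^32):
`r13d = A`: `rtype ≠ 2`: `mov r13d, [rbp−0xc8]` = n (0x10ed0f); `rtype = 2`: `lea r13d, [rax + rax]` with `eax = n` (0x10ee08), no wrap
by P1 (`2·n ≤ blocksize_1 ≤ 8192`). `r12d = b` (0x10ed1e), `cmp r12d, r13d ; cmova r12d, r13d`: replaced by A exactly when `b > A`
unsigned: `r12d = min b A`. `ebx = e` (0x10ed31), `cmp ebx, r13d ; cmova ebx, r13d`: `ebx = min e A`. `sub ebx, r12d`: by R4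
(`b ≤ e`, so `min b A ≤ min e A`: `Res.nRead_no_underflow`) the 32-bit subtraction does not wrap and is the truncated subtraction of
numbers. The two paths "`b > A` and `e ≤ A`" contradict R4. Every 32-bit write zero-extends.

`r12`, `r13`, `r15` are NOT asserted: they are dead at 0x10ed48 (written at 0x10ed59, 0x10ed7e, 0x10ed6d before any read).
Live: `rbx`, `r14`, `rbp`, `rsp`, the slot `[rbp−0xb0]` (`f`, reloaded into r12 at 0x10ed59). -/
structure At1c (u₀ : State) (g : G) (v : State) : Prop where
  /-- at `ret8` -/
  rip : v.rip = L.decode_residue.ret8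
  /-- the steady stack pointer -/
  rsp : v.reg .rsp = g.e.reg .rsp - 248
  /-- `rbp = RA − 8` -/
  rbp : v.reg .rbp = g.e.reg .rsp - 8
  /-- `r14 = r = f->residue_config + rn` (0x10eca6) -/
  r14 : v.reg .r14 = UInt64.ofNat g.r
  /-- `ebx = n_read = limit_r_end − limit_r_begin = min(end, A) − min(begin, A)`, `A = actual_size` (no wrap: R4); the dividend of
  the `div` at 0x10ed4f, whose quotient is `g.PRD` (`Residue.partReadDec` unfolds to exactly this number over `r->part_size`) -/
  rbx : v.reg .rbx = UInt64.ofNat (min (Residue.end_ g.e.mem g.r) (Res.actualDec g.rtype g.n) -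
    min (Residue.begin g.e.mem g.r) (Res.actualDec g.rtype g.n))
  /-- the image's text is unchanged -/
  code : CodeOK u₀ v.mem
  /-- DF = 0, the SSE exceptions masked -/
  inv : abiInv v
  /-- saved rbp -/
  s_rbp : UInt64.ofNat (v.mem.readLE (g.e.reg .rsp - 8) 8) = g.e.reg .rbp
  /-- saved r15 -/
  s_r15 : UInt64.ofNat (v.mem.readLE (g.e.reg .rsp - 16) 8) = g.e.reg .r15
  /-- saved r14 -/
  s_r14 : UInt64.ofNat (v.mem.readLE (g.e.reg .rsp - 24) 8) = g.e.reg .r14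
  /-- saved r13 -/
  s_r13 : UInt64.ofNat (v.mem.readLE (g.e.reg .rsp - 32) 8) = g.e.reg .r13
  /-- saved r12 -/
  s_r12 : UInt64.ofNat (v.mem.readLE (g.e.reg .rsp - 40) 8) = g.e.reg .r12
  /-- saved rbx -/
  s_rbx : UInt64.ofNat (v.mem.readLE (g.e.reg .rsp - 48) 8) = g.e.reg .rbx
  /-- `[rbp−0xb0] = f` -/
  fr_f : UInt64.ofNat (v.mem.readLE (g.e.reg .rsp - 184) 8) = g.e.reg .rdi
  /-- `[rbp−0xd0] = residue_buffers` -/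
  fr_rb : UInt64.ofNat (v.mem.readLE (g.e.reg .rsp - 216) 8) = g.e.reg .rsi
  /-- `[rbp−0x94] = ch` (4 bytes) -/
  fr_ch : v.mem.readLE (g.e.reg .rsp - 156) 4 = g.ch
  /-- `[rbp−0xc8] = n` (4 bytes) -/
  sl_n : v.mem.readLE (g.e.reg .rsp - 208) 4 = g.n
  /-- `[rbp−0xa0] = do_not_decode` -/
  sl_dnd : UInt64.ofNat (v.mem.readLE (g.e.reg .rsp - 168) 8) = g.e.reg .r9
  /-- `[rbp−0xe8]`: the granule index of the protected frame's base -/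
  fr_si : v.mem.readLE (g.e.reg .rsp - 240) 8 = (g.RA - 152) / 8
  /-- `[rbp−0xe0] = rtype` (4 bytes; 0x10ecc3) -/
  fr_rtype : v.mem.readLE (g.e.reg .rsp - 232) 4 = g.rtype
  /-- `[rbp−0xc0] = classwords` (4 bytes; 0x10ecff) -/
  fr_w : v.mem.readLE (g.e.reg .rsp - 200) 4 = g.W
  /-- written so far: as in `At1b` (the two new spills and the return addresses of the check calls lie in `[RA − 256, RA)`) -/
  same : Mem.SameExcept [⟨g.RA - 256, g.RA⟩, shadowSpan (g.RA - 152) (g.RA - 56)] g.e.mem v.mem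
  /-- the shadow layer, as in `At1b` (no store of .1b goes to the shadow) -/
  shadow : ShadowInv g.others g.frames' (g.RA - 248) v.mem

/-! ### The assertion after the allocation -/

/-- **The assertion at 0x10edca** (`L.decode_residue.cut1`: `mov rdi, rax`, the return point of `setup_temp_malloc`; exit of .1c,
entry of .1d). The allocation has succeeded (T3 + `temp_alloc_ok`): `rax` = the base of the temp block `g.TB`; the arena ghost is
`g.A'`, the live non-stack objects are `g.others'` (the temp block added), and the decoder invariant holds in the form "ONE temp
block outstanding" (`ADOBusy`). What `Common.of_frame` will ask at 0x10ee39 is here already, except `fr_pcd` and `TempRows` (which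
`make_block_array` and 0x10edd8 establish): the frame slots, the footprint, the shadow layer, `Bits`, `ADOBusy`, μ.

Live registers at 0x10edca: `rax` (→ rdi), `r12d = C` (→ esi), `r13d = 8·part_read` (→ edx), `r14 = r` (spilled at 0x10ede4),
`r15d = temp_alloc_point` (spilled at 0x10edeb), `rbp`, `rsp`; r12 – r15 are callee-saved across `make_block_array`. `rbx` is dead
(`mov ebx, 0` at 0x10eddf). -/
structure At1d (u₀ : State) (g : G) (v : State) : Prop where
  /-- at `cut1` -/
  rip : v.rip = L.decode_residue.cut1
  /-- the steady stack pointer -/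
  rsp : v.reg .rsp = g.e.reg .rsp - 248
  /-- `rbp = RA − 8` -/
  rbp : v.reg .rbp = g.e.reg .rsp - 8
  /-- `rax` = what `setup_temp_malloc` returned = the base of the temp block -/
  rax : v.reg .rax = UInt64.ofNat g.TB.base
  /-- `r12d = C = f->channels` (0x10ed93) -/
  r12 : v.reg .r12 = UInt64.ofNat g.C
  /-- `r13d = 8·part_read` (0x10ed7e; `part_read ≤ 2·n ≤ 8192`: no wrap) -/
  r13 : v.reg .r13 = UInt64.ofNat (8 * g.PRD)
  /-- `r14 = r` -/
  r14 : v.reg .r14 = UInt64.ofNat g.r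
  /-- `r15d = temp_alloc_point = f->temp_offset` read BEFORE the allocation (0x10ed6d) `= T = L` (ADO) -/
  r15 : v.reg .r15 = UInt64.ofNat g.tap
  /-- the image's text is unchanged -/
  code : CodeOK u₀ v.mem
  /-- DF = 0, the SSE exceptions masked -/
  inv : abiInv v
  /-- saved rbp -/
  s_rbp : UInt64.ofNat (v.mem.readLE (g.e.reg .rsp - 8) 8) = g.e.reg .rbp
  /-- saved r15 -/
  s_r15 : UInt64.ofNat (v.mem.readLE (g.e.reg .rsp - 16) 8) = g.e.reg .r15
  /-- saved r14 -/
  s_r14 : UInt64.ofNat (v.mem.readLE (g.e.reg .rsp - 24) 8) = g.e.reg .r14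
  /-- saved r13 -/
  s_r13 : UInt64.ofNat (v.mem.readLE (g.e.reg .rsp - 32) 8) = g.e.reg .r13
  /-- saved r12 -/
  s_r12 : UInt64.ofNat (v.mem.readLE (g.e.reg .rsp - 40) 8) = g.e.reg .r12
  /-- saved rbx -/
  s_rbx : UInt64.ofNat (v.mem.readLE (g.e.reg .rsp - 48) 8) = g.e.reg .rbx
  /-- `[rbp−0xb0] = f` (stored again at 0x10ed98, the same value) -/
  fr_f : UInt64.ofNat (v.mem.readLE (g.e.reg .rsp - 184) 8) = g.e.reg .rdi
  /-- `[rbp−0xd0] = residue_buffers` -/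
  fr_rb : UInt64.ofNat (v.mem.readLE (g.e.reg .rsp - 216) 8) = g.e.reg .rsi
  /-- `[rbp−0x94] = ch` (4 bytes; reloaded into r14d at 0x10edf2) -/
  fr_ch : v.mem.readLE (g.e.reg .rsp - 156) 4 = g.ch
  /-- `[rbp−0xbc] = part_read` (4 bytes; 0x10ed53) -/
  fr_prd : v.mem.readLE (g.e.reg .rsp - 196) 4 = g.PRD
  /-- `[rbp−0xc0] = classwords` (4 bytes) -/
  fr_w : v.mem.readLE (g.e.reg .rsp - 200) 4 = g.W
  /-- `[rbp−0xe0] = rtype` (4 bytes) -/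
  fr_rtype : v.mem.readLE (g.e.reg .rsp - 232) 4 = g.rtype
  /-- `[rbp−0xe8]`: the granule index of the protected frame's base -/
  fr_si : v.mem.readLE (g.e.reg .rsp - 240) 8 = (g.RA - 152) / 8
  /-- `[rbp−0xc8] = n` (4 bytes) -/
  sl_n : v.mem.readLE (g.e.reg .rsp - 208) 4 = g.n
  /-- `[rbp−0xa0] = do_not_decode` (reloaded into r15 at 0x10edf9) -/
  sl_dnd : UInt64.ofNat (v.mem.readLE (g.e.reg .rsp - 168) 8) = g.e.reg .r9
  /-- what has been written so far lies in the contract's footprint: the stack, the own frame's shadow, `temp_offset`, the shadow of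
  the temp block -/
  same : Mem.SameExcept (g.spec.footprint g.e) g.e.mem v.mem
  /-- the shadow layer AFTER the allocation: the temp block is a live object (`setup_temp_malloc`'s post with `frames := g.frames'`,
  `rsp + 8 = RA − 248` at its entry) -/
  shadow : ShadowInv g.others' g.frames' (g.RA - 248) v.mem
  /-- `Bits` of the present memory (of `*f` only `temp_offset` changed: `setup_temp_malloc.objEq`, `Bits.transfer`) -/
  bits : Bits g.Blk g.len v.mem g.f
  /-- ONE temp block of `g.sz` bytes is outstanding (`ADO.alloc` from the entry's ADO and the callee's `ArenaOK`) -/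
  busy : ADOBusy g.A' g.others' v.mem g.f g.sz
  /-- μ not increased (`mu_transfer`: `temp_offset` is not in `muWins`) -/
  mu_le : mu v.mem g.f ≤ mu g.e.mem g.f

/-! ### The four child claims and their composition -/

/-- **decode_residue.1a** (0x10ec00–0x10ec90; C 2132–2134): the protected prologue and the check of `f->residue_config`. From the
function's entry to `ret1`. One check site (inside `*f`: OB1). -/
def Seg1a (Lay : Layout) (μ : Microarch) (u₀ : State) : Prop :=
  ∀ g : G, Entered u₀ g →
    ReachVia Lay μ WayInv g.e (fun v' => At1b u₀ g v')

/-- **decode_residue.1b** (0x10ec95–0x10ed43 + 0x10ee02–0x10ee0c; C 2134–2141): `r`, `rtype`, the class book, `classwords`,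
`actual_size`, `limit_r_begin`, `limit_r_end`, `n_read`. Seven check sites: two inside `*f`, three inside the record (R2), one inside
the codebooks block (CB0 + R7), none after a store to the shadow. The six feasible paths of `je` / `cmova` / `cmova` end in ONE
assertion. -/
def Seg1b (Lay : Layout) (μ : Microarch) (u₀ : State) : Prop :=
  ∀ g : G, Entered u₀ g →
    ∀ v, At1b u₀ g v →
      ReachVia Lay μ WayInv v (fun v' => At1c u₀ g v')

/-- **decode_residue.1c** (0x10ed48–0x10edc5, the dead arm 0x10ee11–0x10ee34; C 2142–2145): `part_read = n_read / r->part_size`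
(R5: `part_size ≥ 1`), `temp_alloc_point`, `f->channels`, the test of `f->alloc.alloc_buffer` (not NULL: the `alloca` arm is dead),
`setup_temp_malloc(f, (part_read + 1)·C·8)` — the request is `g.sz` without 32-bit wrap, at most `temp_memory_required` (T3), so it
fits (`temp_alloc_ok`); the result is not tested by the code. Three check sites inside `*f`. -/
def Seg1c (Lay : Layout) (μ : Microarch) (u₀ : State) : Prop :=
  ∀ g : G, Entered u₀ g →
    ∀ v, At1c u₀ g v →
      ReachVia Lay μ WayInv v (fun v' => At1d u₀ g v')

/-- **decode_residue.1d** (0x10edca–0x10ee00; C 2145–2152): `make_block_array(p, C, 8·part_read)` (TB: `TempRows`), the spill of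
`part_classdata`, `i = 0`, the spills of `r` and `temp_alloc_point`, the reloads of `ch` and `do_not_decode`. To the head of loop
2152 with `i = 0`; COMMON holds for the first time (`Common.of_frame`). No check site. -/
def Seg1d (Lay : Layout) (μ : Microarch) (u₀ : State) : Prop :=
  ∀ g : G, Entered u₀ g →
    ∀ v, At1d u₀ g v →
      ReachVia Lay μ WayInv v (fun v' => At3 u₀ g v')

/-- **Segment .1 from its four parts**: the prologue reaches `ret1` with `At1b`, the lookup goes on to `ret8` with `At1c`, the
allocation to `cut1` with `At1d`, and the row table and the loop's initialisation to `cut3` with `At3`. -/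
theorem Seg1.of_parts {Lay : Layout} {μ : Microarch} {u₀ : State}
    (ha : Seg1a Lay μ u₀) (hb : Seg1b Lay μ u₀) (hc : Seg1c Lay μ u₀) (hd : Seg1d Lay μ u₀) : Seg1 Lay μ u₀ := by
  intro g he
  refine (ha g he).trans ?_
  intro vb hvb
  refine (hb g he vb hvb).trans ?_
  intro vc hvc
  refine (hc g he vc hvc).trans ?_
  intro vd hvd
  exact hd g he vd hvd

end DecodeResidue

end Vorbis.Spec
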